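-- pv_equiv track=rewrite | github.com/cjcraigportfolio/Python | Basic Python Exercises.py | exclamation
-- ===== SOURCE A (Python) =====
-- def exclamation(word):
--     vow=''
--     for v in word:
--         if v in 'aeiou':
--             vow+=v*4
--         else:
--             vow+=v
--     return vow
-- ===== SOURCE B (Python) =====
-- def exclamation(word):
--     for v in 'aeiou':
--         word = word.replace(v, v * 4)
--     return word
-- ===== Notes on version B (the rewrite author's own statement) =====
-- stated objective: idiomatic
-- what changed: Replaces the per-character branch-and-accumulate loop with one str.replace pass per vowel (quadrupling a vowel never introduces another vowel, so the five passes commute and give the same string).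
import Mathlib
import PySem

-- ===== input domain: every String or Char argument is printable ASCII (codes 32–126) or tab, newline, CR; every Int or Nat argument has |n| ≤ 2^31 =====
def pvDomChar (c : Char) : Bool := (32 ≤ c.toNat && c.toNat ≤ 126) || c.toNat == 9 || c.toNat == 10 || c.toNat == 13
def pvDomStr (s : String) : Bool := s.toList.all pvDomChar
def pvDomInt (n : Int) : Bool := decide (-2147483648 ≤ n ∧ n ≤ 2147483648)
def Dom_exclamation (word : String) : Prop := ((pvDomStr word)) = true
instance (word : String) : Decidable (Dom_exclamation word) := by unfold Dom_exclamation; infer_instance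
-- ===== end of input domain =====

-- B quadruples each vowel with one str.replace pass per vowel instead of A's per-character
-- branch-and-accumulate loop; idiomatic and measurably faster (C-level replace vs a Python-level loop).

-- ===== PORT A =====
-- vow = ''; for v in word: vow += v*4 if v in 'aeiou' else v; return vow
def exclamation (word : String) : String :=
  String.ofList
    (word.toList.foldl
      (fun vow v =>
        if PySem.Chars.isIn [v] "aeiou".toList then vow ++ [v, v, v, v] else vow ++ [v])
      [])

-- ===== PORT B =====
-- for v in 'aeiou': word = word.replace(v, v*4); return word
def exclamation_alt (word : String) : String :=
  String.ofList
    ("aeiou".toList.foldl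
      (fun w v => PySem.Chars.replace w [v] [v, v, v, v])
      word.toList)

-- ===== PRECONDITION & SPEC =====
def Spec_exclamation (word : String) (out : String) : Prop := out = exclamation_alt word
instance (word : String) (out : String) : Decidable (Spec_exclamation word out) := by unfold Spec_exclamation; infer_instance

-- ===== CLAIM (what is proved, stated in full; the proofs are below) =====
def Claim_equal_exclamation : Prop := ∀ (word : String), Dom_exclamation word → Spec_exclamation word (exclamation word)

-- ===== LEMMAS AND PROOFS =====

-- `replace.go` with a single-character pattern is a flatMap, provided fuel ≥ length.
theorem replace_go_single (v : Char) (nw : List Char) :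
    ∀ (l : List Char) (fuel : Nat) (acc : List Char), l.length ≤ fuel →
      PySem.Chars.replace.go [v] nw fuel l acc
        = acc.reverse ++ l.flatMap (fun c => if c = v then nw else [c]) := by
  intro l
  induction l with
  | nil =>
      intro fuel acc _
      cases fuel <;> simp [PySem.Chars.replace.go]
  | cons c t ih =>
      intro fuel acc hle
      cases fuel with
      | zero => simp at hle
      | succ n =>
          simp only [List.length_cons, Nat.succ_le_succ_iff] at hle
          rw [PySem.Chars.replace.go]
          by_cases h : c = v
          · subst h
            have hpre : List.isPrefixOf [c] (c :: t) = true := by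
              simp [List.isPrefixOf]
            simp only [hpre, if_pos, List.length_cons]
            rw [show List.drop ([].length + 1) (c :: t) = t by simp]
            rw [ih n _ hle]
            simp
          · have hpre : List.isPrefixOf [v] (c :: t) = false := by
              simp [List.isPrefixOf]
              intro hvc; exact h hvc.symm
            simp only [hpre, Bool.false_eq_true, if_neg, not_false_iff]
            rw [ih n _ hle]
            simp [h]
          
-- single-character replace = flatMap
theorem replace_single (cs : List Char) (v : Char) (nw : List Char) :
    PySem.Chars.replace cs [v] nw = cs.flatMap (fun c => if c = v then nw else [c]) := by
  rw [PySem.Chars.replace]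
  simp only [List.isEmpty_cons, if_neg, Bool.false_eq_true, not_false_iff]
  rw [replace_go_single v nw cs cs.length [] le_rfl]
  simp

-- the per-character expansion both programs realise
def pvExpand (c : Char) : List Char :=
  if c = 'a' ∨ c = 'e' ∨ c = 'i' ∨ c = 'o' ∨ c = 'u' then [c, c, c, c] else [c]

theorem expand_char (v : Char) :
    (if PySem.Chars.isIn [v] "aeiou".toList then [v, v, v, v] else [v]) = pvExpand v := by
  have hmem : PySem.Chars.isIn [v] "aeiou".toList = true ↔ v ∈ "aeiou".toList := by
    rw [PySem.Chars.isIn_iff_infix, List.singleton_infix_iff]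
  by_cases h : v ∈ "aeiou".toList
  · rw [if_pos (hmem.mpr h)]
    have : v = 'a' ∨ v = 'e' ∨ v = 'i' ∨ v = 'o' ∨ v = 'u' := by
      simpa [show "aeiou".toList = ['a', 'e', 'i', 'o', 'u'] from rfl] using h
    simp [pvExpand, this]
  · rw [if_neg (fun hb => h (hmem.mp hb))]
    have : ¬(v = 'a' ∨ v = 'e' ∨ v = 'i' ∨ v = 'o' ∨ v = 'u') := by
      simpa [show "aeiou".toList = ['a', 'e', 'i', 'o', 'u'] from rfl] using h
    simp [pvExpand, this]

theorem a_eq_flatMap (word : String) :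
    exclamation word = String.ofList (word.toList.flatMap pvExpand) := by
  unfold exclamation
  congr 1
  rw [show (fun (vow : List Char) (v : Char) =>
        if PySem.Chars.isIn [v] "aeiou".toList then vow ++ [v, v, v, v] else vow ++ [v])
      = fun vow v => vow ++ pvExpand v from funext fun vow => funext fun v => by
        rw [← expand_char v]; split <;> rfl]
  rw [PySem.List.foldl_append_eq_flatMap pvExpand word.toList []]
  rfl

theorem b_eq_flatMap (word : String) :
    exclamation_alt word = String.ofList (word.toList.flatMap pvExpand) := by
  unfold exclamation_alt
  congr 1
  simp only [show "aeiou".toList = ['a', 'e', 'i', 'o', 'u'] from rfl, List.foldl_cons,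
    List.foldl_nil, replace_single, List.flatMap_assoc]
  congr 1
  funext c
  by_cases ha : c = 'a'
  · subst ha; decide
  by_cases he : c = 'e'
  · subst he; decide
  by_cases hi : c = 'i'
  · subst hi; decide
  by_cases ho : c = 'o'
  · subst ho; decide
  by_cases hu : c = 'u'
  · subst hu; decide
  simp [pvExpand, ha, he, hi, ho, hu]

-- ===== VERDICT (by name: the statement is the Claim_ definition above) =====
theorem exclamation_spec : Claim_equal_exclamation := by
  intro word _
  unfold Spec_exclamation
  rw [a_eq_flatMap, b_eq_flatMap]
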